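-- pv_equiv track=rewrite | github.com/oktayelb/hatirlaf | savyar/ml/ml_ranking_model.py | _chain_tokens
-- ===== SOURCE A (Python) =====
-- from typing import List, Optional, Tuple, Dict, Any
--
-- SPECIAL_WORD_SEP      = 1
--
-- CATEGORY_SPECIAL      = 2
--
-- SPECIAL_FEATURE_ID    = 0
--
-- WORD_FINAL_NO         = 0
--
-- EncodedToken = Tuple[int, int, int, int, int, int, int]
--
-- FlatSequence = Tuple[List[int], List[int], List[int], List[int], List[int], List[int], List[int]]
--
-- def _chain_tokens(
--     word_chains: List[List[EncodedToken]]
-- ) -> FlatSequence: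
--     suffix_ids:   List[int] = []
--     category_ids: List[int] = []
--     group_ids:    List[int] = []
--     comes_to_ids: List[int] = []
--     makes_ids:    List[int] = []
--     pos_ids:      List[int] = []
--     word_final:   List[int] = []
--     for chain in word_chains:
--         for (sid, cid, gid, comes_to_id, makes_id, pos_in_word, is_final) in chain:
--             suffix_ids.append(sid)
--             category_ids.append(cid)
--             group_ids.append(gid)
--             comes_to_ids.append(comes_to_id)
--             makes_ids.append(makes_id)
--             pos_ids.append(pos_in_word)
--             word_final.append(is_final)
--         suffix_ids.append(SPECIAL_WORD_SEP)
--         category_ids.append(CATEGORY_SPECIAL)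
--         group_ids.append(SPECIAL_FEATURE_ID)
--         comes_to_ids.append(SPECIAL_FEATURE_ID)
--         makes_ids.append(SPECIAL_FEATURE_ID)
--         pos_ids.append(SPECIAL_FEATURE_ID)
--         word_final.append(WORD_FINAL_NO)
--     return suffix_ids, category_ids, group_ids, comes_to_ids, makes_ids, pos_ids, word_final
-- ===== SOURCE B (Python) =====
-- SPECIAL_WORD_SEP      = 1
-- CATEGORY_SPECIAL      = 2
-- SPECIAL_FEATURE_ID    = 0
-- WORD_FINAL_NO         = 0
--
-- _SEP_ROW = (SPECIAL_WORD_SEP, CATEGORY_SPECIAL, SPECIAL_FEATURE_ID,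
--             SPECIAL_FEATURE_ID, SPECIAL_FEATURE_ID, SPECIAL_FEATURE_ID,
--             WORD_FINAL_NO)
--
-- def _chain_tokens(word_chains):
--     rows = []
--     for chain in word_chains:
--         rows.extend(chain)
--         rows.append(_SEP_ROW)
--     if not rows:
--         return [], [], [], [], [], [], []
--     return tuple(list(col) for col in zip(*rows))
-- ===== Notes on version B (the rewrite author's own statement) =====
-- stated objective: alternative
-- what changed: B builds a single flat list of 7-tuple rows (chain rows plus one separator row per chain) and transposes it once with zip(*rows), instead of maintaining seven parallel accumulator lists with seven appends per token.
import Mathlib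
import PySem

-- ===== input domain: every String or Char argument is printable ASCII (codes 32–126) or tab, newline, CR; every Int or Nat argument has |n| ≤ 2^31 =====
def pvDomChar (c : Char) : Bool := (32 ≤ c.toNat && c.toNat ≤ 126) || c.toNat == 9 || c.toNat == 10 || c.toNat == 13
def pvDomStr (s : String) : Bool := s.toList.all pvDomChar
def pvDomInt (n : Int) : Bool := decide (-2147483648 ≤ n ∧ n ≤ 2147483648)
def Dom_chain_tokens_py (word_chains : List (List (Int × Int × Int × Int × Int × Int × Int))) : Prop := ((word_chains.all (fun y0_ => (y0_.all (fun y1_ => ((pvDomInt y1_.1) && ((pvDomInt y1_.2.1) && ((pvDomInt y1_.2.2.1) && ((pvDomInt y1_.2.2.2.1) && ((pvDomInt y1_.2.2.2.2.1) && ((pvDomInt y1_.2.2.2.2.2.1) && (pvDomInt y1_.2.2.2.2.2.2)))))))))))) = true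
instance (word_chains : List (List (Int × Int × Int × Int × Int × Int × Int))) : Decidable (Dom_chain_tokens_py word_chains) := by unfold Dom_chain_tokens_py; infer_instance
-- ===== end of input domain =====

-- B builds one flat list of 7-tuple rows (token rows plus one separator row per chain) and
-- transposes it once, instead of A's seven parallel accumulator lists; same cost, different structure.

-- ===== PORT A =====
-- literal transliteration of A: seven parallel lists, appended token by token, then a separator per chain
def pvTokStep (s : List Int × List Int × List Int × List Int × List Int × List Int × List Int)
    (t : Int × Int × Int × Int × Int × Int × Int) : List Int × List Int × List Int × List Int × List Int × List Int × List Int :=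
  (s.1 ++ [t.1], s.2.1 ++ [t.2.1], s.2.2.1 ++ [t.2.2.1], s.2.2.2.1 ++ [t.2.2.2.1],
   s.2.2.2.2.1 ++ [t.2.2.2.2.1], s.2.2.2.2.2.1 ++ [t.2.2.2.2.2.1], s.2.2.2.2.2.2 ++ [t.2.2.2.2.2.2])

def pvChainStep (st : List Int × List Int × List Int × List Int × List Int × List Int × List Int)
    (chain : List (Int × Int × Int × Int × Int × Int × Int)) : List Int × List Int × List Int × List Int × List Int × List Int × List Int :=
  let st2 := chain.foldl pvTokStep st
  (st2.1 ++ [1], st2.2.1 ++ [2], st2.2.2.1 ++ [0], st2.2.2.2.1 ++ [0],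
   st2.2.2.2.2.1 ++ [0], st2.2.2.2.2.2.1 ++ [0], st2.2.2.2.2.2.2 ++ [0])

def chain_tokens_py (word_chains : List (List (Int × Int × Int × Int × Int × Int × Int))) : List Int × List Int × List Int × List Int × List Int × List Int × List Int :=
  word_chains.foldl pvChainStep ([], [], [], [], [], [], [])

-- ===== PORT B =====
-- the separator row (SPECIAL_WORD_SEP, CATEGORY_SPECIAL, 0,0,0,0, WORD_FINAL_NO)
def pvSepRow : Int × Int × Int × Int × Int × Int × Int := (1, 2, 0, 0, 0, 0, 0)

-- literal transliteration of B: build the flat row list, then transpose (zip(*rows)); empty rows special-cased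
def chain_tokens_py_alt (word_chains : List (List (Int × Int × Int × Int × Int × Int × Int))) : List Int × List Int × List Int × List Int × List Int × List Int × List Int :=
  let rows := word_chains.foldl (fun acc chain => acc ++ chain ++ [pvSepRow]) []
  match rows with
  | [] => ([], [], [], [], [], [], [])
  | _ => (rows.map (·.1), rows.map (·.2.1), rows.map (·.2.2.1), rows.map (·.2.2.2.1),
          rows.map (·.2.2.2.2.1), rows.map (·.2.2.2.2.2.1), rows.map (·.2.2.2.2.2.2))

-- ===== PRECONDITION & SPEC =====
def Spec_chain_tokens_py (word_chains : List (List (Int × Int × Int × Int × Int × Int × Int))) (out : List Int × List Int × List Int × List Int × List Int × List Int × List Int) : Prop := out = chain_tokens_py_alt word_chains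
instance (word_chains : List (List (Int × Int × Int × Int × Int × Int × Int))) (out : List Int × List Int × List Int × List Int × List Int × List Int × List Int) : Decidable (Spec_chain_tokens_py word_chains out) := by
  unfold Spec_chain_tokens_py
  letI d2 : DecidableEq (List Int × List Int) := instDecidableEqProd
  letI d3 : DecidableEq (List Int × List Int × List Int) := instDecidableEqProd
  letI d4 : DecidableEq (List Int × List Int × List Int × List Int) := instDecidableEqProd
  letI d5 : DecidableEq (List Int × List Int × List Int × List Int × List Int) := instDecidableEqProd
  letI d6 : DecidableEq (List Int × List Int × List Int × List Int × List Int × List Int) := instDecidableEqProd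
  letI d7 : DecidableEq (List Int × List Int × List Int × List Int × List Int × List Int × List Int) := instDecidableEqProd
  exact d7 _ _

-- ===== CLAIM (what is proved, stated in full; the proofs are below) =====
def Claim_equal_chain_tokens_py : Prop := ∀ (word_chains : List (List (Int × Int × Int × Int × Int × Int × Int))), Dom_chain_tokens_py word_chains → Spec_chain_tokens_py word_chains (chain_tokens_py word_chains)

-- ===== LEMMAS AND PROOFS =====

-- the flat row list B builds, as a flatMap
def pvFlat (wc : List (List (Int × Int × Int × Int × Int × Int × Int))) : List (Int × Int × Int × Int × Int × Int × Int) :=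
  wc.flatMap (fun c => c ++ [pvSepRow])

-- the seven columns of a row list
def pvCols (rows : List (Int × Int × Int × Int × Int × Int × Int)) : List Int × List Int × List Int × List Int × List Int × List Int × List Int :=
  (rows.map (·.1), rows.map (·.2.1), rows.map (·.2.2.1), rows.map (·.2.2.2.1),
   rows.map (·.2.2.2.2.1), rows.map (·.2.2.2.2.2.1), rows.map (·.2.2.2.2.2.2))

theorem pvInner (chain : List (Int × Int × Int × Int × Int × Int × Int))
    (s : List Int × List Int × List Int × List Int × List Int × List Int × List Int) :
    chain.foldl pvTokStep s
    = (s.1 ++ chain.map (·.1), s.2.1 ++ chain.map (·.2.1), s.2.2.1 ++ chain.map (·.2.2.1),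
       s.2.2.2.1 ++ chain.map (·.2.2.2.1), s.2.2.2.2.1 ++ chain.map (·.2.2.2.2.1),
       s.2.2.2.2.2.1 ++ chain.map (·.2.2.2.2.2.1), s.2.2.2.2.2.2 ++ chain.map (·.2.2.2.2.2.2)) := by
  induction chain generalizing s with
  | nil => simp
  | cons t rest ih => simp [pvTokStep, ih]

theorem pvOuter (wc : List (List (Int × Int × Int × Int × Int × Int × Int)))
    (s : List Int × List Int × List Int × List Int × List Int × List Int × List Int) :
    wc.foldl pvChainStep s
    = (s.1 ++ (pvFlat wc).map (·.1), s.2.1 ++ (pvFlat wc).map (·.2.1),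
       s.2.2.1 ++ (pvFlat wc).map (·.2.2.1), s.2.2.2.1 ++ (pvFlat wc).map (·.2.2.2.1),
       s.2.2.2.2.1 ++ (pvFlat wc).map (·.2.2.2.2.1),
       s.2.2.2.2.2.1 ++ (pvFlat wc).map (·.2.2.2.2.2.1),
       s.2.2.2.2.2.2 ++ (pvFlat wc).map (·.2.2.2.2.2.2)) := by
  induction wc generalizing s with
  | nil => simp [pvFlat]
  | cons c rest ih =>
    simp only [List.foldl_cons, pvChainStep, pvInner, ih]
    simp [pvFlat, pvSepRow]

theorem pvA_eq_cols (wc : List (List (Int × Int × Int × Int × Int × Int × Int))) :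
    chain_tokens_py wc = pvCols (pvFlat wc) := by
  simp [chain_tokens_py, pvOuter, pvCols]

theorem pvRows_eq (wc : List (List (Int × Int × Int × Int × Int × Int × Int))) :
    wc.foldl (fun acc chain => acc ++ chain ++ [pvSepRow]) [] = pvFlat wc := by
  have h : ∀ (l : List (List (Int × Int × Int × Int × Int × Int × Int)))
      (acc : List (Int × Int × Int × Int × Int × Int × Int)),
      l.foldl (fun acc chain => acc ++ chain ++ [pvSepRow]) acc = acc ++ pvFlat l := by
    intro l
    induction l with
    | nil => intro acc; simp [pvFlat]
    | cons c rest ih =>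
      intro acc
      rw [List.foldl_cons, ih]
      simp [pvFlat, List.flatMap_cons]
  simpa using h wc []

theorem pvB_eq_cols (wc : List (List (Int × Int × Int × Int × Int × Int × Int))) :
    chain_tokens_py_alt wc = pvCols (pvFlat wc) := by
  unfold chain_tokens_py_alt
  rw [pvRows_eq]
  cases h : pvFlat wc with
  | nil => simp [pvCols]
  | cons r rs => simp [pvCols]

-- ===== VERDICT (by name: the statement is the Claim_ definition above) =====
theorem chain_tokens_py_spec : Claim_equal_chain_tokens_py := by
  intro wc _
  unfold Spec_chain_tokens_py
  rw [pvA_eq_cols, pvB_eq_cols]
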